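-- pv_equiv track=rewrite | github.com/philzook58/knuckledragger | kdrag/solvers/kb/string.py | overlaps
-- ===== SOURCE A (Python) =====
-- from typing import Optional, Sequence
--
-- def subseq(s: Sequence, t: Sequence) -> Optional[int]:
--     """Return index when s is a subsequence of t, None otherwise
--
--     >>> subseq("abc", "abacabadabacaba") is None
--     True
--     >>> subseq("abc", "abacabc")
--     4
--     """
--     for i in range(len(t) - len(s) + 1):
--         if s == t[i : i + len(s)]:
--             return i
--     return None
--
-- def overlaps(s, t):
--     """
--     critical pairs https://en.wikipedia.org/wiki/Critical_pair_(term_rewriting)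
--
--     >>> assert set(overlaps((1,2), (2,3))) == {(1,2,3)}
--     >>> assert set(overlaps((1,2), (3,2))) == set()
--     >>> assert set(overlaps((1,2), (2,1))) == {(1,2,1), (2,1,2)}
--     >>> assert set(overlaps((1,2), (1,2))) == {(1,2)}
--     >>> assert set(overlaps((2,2), (2,2,3))) == {(2,2,3), (2,2,2,3)}
--     >>> assert set(overlaps((), (1,2))) == {(1,2)}
--     """
--     # make len(t) >= len(s)
--     if len(t) < len(s):
--         s, t = t, s
--     if subseq(s, t) is not None:
--         yield t
--     # iterate over possible overlap sizes 1 to the len(s) at edges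
--     for osize in range(1, len(s)):
--         if t[-osize:] == s[:osize]:
--             yield t + s[osize:]
--         if s[-osize:] == t[:osize]:
--             yield s + t[osize:]
-- ===== SOURCE B (Python) =====
-- def _zarray(a):
--     # Z-function (linear): z[i] = length of the longest common prefix of a and a[i:]
--     n = len(a)
--     z = [0] * n
--     l = r = 0
--     for i in range(1, n):
--         zi = 0
--         if i < r:
--             zi = min(r - i, z[i - l])
--         while i + zi < n and a[zi] == a[i + zi]:
--             zi += 1
--         z[i] = zi
--         if i + zi > r:
--             l, r = i, i + zi
--     return z
--
-- def overlaps(s, t):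
--     if len(t) < len(s):
--         s, t = t, s
--     n, m = len(s), len(t)
--     z1 = _zarray(s + t)  # prefix = s
--     z2 = _zarray(t + s)  # prefix = t
--     res = []
--     if n == 0 or any(z1[n + i] >= n for i in range(m - n + 1)):
--         res.append(t)
--     for k in range(1, n):
--         if z1[n + m - k] >= k:
--             res.append(t + s[k:])
--         if z2[m + n - k] >= k:
--             res.append(s + t[k:])
--     return res
-- ===== Notes on version B (the rewrite author's own statement) =====
-- stated objective: alternative
-- what changed: Replaces per-overlap-size slice comparisons and the naive substring scan by two linear Z-function arrays of s++t and t++s, from which the substring occurrence and every prefix/suffix overlap are read off by index lookups.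
import Mathlib
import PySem

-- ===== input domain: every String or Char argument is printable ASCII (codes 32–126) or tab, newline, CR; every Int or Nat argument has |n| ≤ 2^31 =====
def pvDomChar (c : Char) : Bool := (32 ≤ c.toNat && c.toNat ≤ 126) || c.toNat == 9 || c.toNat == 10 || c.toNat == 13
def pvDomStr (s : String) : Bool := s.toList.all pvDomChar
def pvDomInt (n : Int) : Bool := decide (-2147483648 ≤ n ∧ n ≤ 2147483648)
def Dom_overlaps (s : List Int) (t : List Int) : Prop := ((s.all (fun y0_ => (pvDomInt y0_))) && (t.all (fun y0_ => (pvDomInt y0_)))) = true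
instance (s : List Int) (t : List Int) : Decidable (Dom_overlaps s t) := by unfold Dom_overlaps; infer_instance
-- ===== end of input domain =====

-- B replaces A's per-overlap-size slice comparisons and naive substring scan by two
-- linear Z-function arrays of s++t and t++s, read off by index lookups (objective: alternative).

-- ===== PORT A =====
-- port of helper subseq: first index where s == t[i:i+len(s)], else None
def subseq (s t : List Int) : Option Int :=
  (PySem.List.pyRange 0 ((t.length : Int) - (s.length : Int) + 1) 1).find?
    (fun i => s == PySem.List.slice t (some i) (some (i + (s.length : Int))))

-- the body of overlaps after the initial swap has made len(t) >= len(s)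
def overlapsCore (s t : List Int) : List (List Int) :=
  let head := if (subseq s t).isSome then [t] else []
  (PySem.List.pyRange 1 (s.length : Int) 1).foldl (fun acc k =>
    let acc2 := if PySem.List.slice t (some (-k)) none == PySem.List.slice s none (some k)
                then acc ++ [t ++ PySem.List.slice s (some k) none] else acc
    if PySem.List.slice s (some (-k)) none == PySem.List.slice t none (some k)
    then acc2 ++ [s ++ PySem.List.slice t (some k) none] else acc2) head

def overlaps (s t : List Int) : List (List Int) :=
  if t.length < s.length then overlapsCore t s else overlapsCore s t

-- ===== PORT B =====
-- the inner while-loop of _zarray: extend the match length zi at position i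
def zwhile (a : Array Int) (i : Nat) (zi : Nat) : Nat :=
  if h : i + zi < a.size ∧ a.getD zi 0 = a.getD (i + zi) 0 then
    zwhile a i (zi + 1)
  else zi
termination_by a.size - (i + zi)
decreasing_by omega

-- one iteration of _zarray's for-loop; state is (z, l, r)
def zstep (a : Array Int) (st : Array Nat × Nat × Nat) (i : Nat) : Array Nat × Nat × Nat :=
  let z := st.1
  let l := st.2.1
  let r := st.2.2
  let zi0 := if i < r then min (r - i) (z.getD (i - l) 0) else 0
  let zi := zwhile a i zi0
  let z' := z.setIfInBounds i zi
  if r < i + zi then (z', i, i + zi) else (z', l, r)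

-- port of _zarray (linear Z-function: z = [0]*n; l = r = 0; for i in range(1, n): ...)
def zarray (a : Array Int) : Array Nat :=
  ((List.range' 1 (a.size - 1)).foldl (zstep a) (Array.replicate a.size 0, 0, 0)).1

-- the body of B's overlaps after the initial swap
def altCore (s t : List Int) : List (List Int) :=
  let n := s.length
  let m := t.length
  let z1 := zarray (s ++ t).toArray
  let z2 := zarray (t ++ s).toArray
  let res := if n = 0 ∨ (List.range (m - n + 1)).any (fun i => n ≤ z1.getD (n + i) 0) then [t] else []
  (List.range' 1 (n - 1)).foldl (fun res k =>
    let res2 := if k ≤ z1.getD (n + m - k) 0 then res ++ [t ++ s.drop k] else res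
    if k ≤ z2.getD (m + n - k) 0 then res2 ++ [s ++ t.drop k] else res2) res

def overlaps_alt (s t : List Int) : List (List Int) :=
  if t.length < s.length then altCore t s else altCore s t

-- ===== PRECONDITION & SPEC =====
def Spec_overlaps (s : List Int) (t : List Int) (out : List (List Int)) : Prop := out = overlaps_alt s t
instance (s : List Int) (t : List Int) (out : List (List Int)) : Decidable (Spec_overlaps s t out) := by unfold Spec_overlaps; infer_instance

-- ===== CLAIM (what is proved, stated in full; the proofs are below) =====
def Claim_equal_overlaps : Prop := ∀ (s : List Int) (t : List Int), Dom_overlaps s t → Spec_overlaps s t (overlaps s t)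

-- ===== LEMMAS AND PROOFS =====

-- length of the longest common prefix of two lists
def lcp : List Int → List Int → Nat
  | x :: xs, y :: ys => if x = y then lcp xs ys + 1 else 0
  | _, _ => 0

theorem lcp_le_right (a b : List Int) : lcp a b ≤ b.length := by
  fun_induction lcp a b <;> simp_all

theorem le_lcp_iff (a b : List Int) (k : Nat) :
    k ≤ lcp a b ↔ k ≤ a.length ∧ k ≤ b.length ∧ a.take k = b.take k := by
  induction a generalizing b k with
  | nil => cases k <;> simp [lcp]
  | cons x xs ih =>
    cases b with
    | nil => cases k <;> simp [lcp]
    | cons y ys =>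
      cases k with
      | zero => simp
      | succ k' =>
        by_cases hxy : x = y
        · subst hxy; simp [lcp, ih]
        · simp [lcp, hxy]

theorem getElem_of_take_eq (L M : List Int) (k : Nat) (he : L.take (k+1) = M.take (k+1))
    (h3 : k < L.length) (h2 : k < M.length) : L[k] = M[k] := by
  have := congrArg (fun l => l[k]?) he
  simpa [List.getElem?_take, h2, h3, List.getElem?_eq_getElem] using this

theorem zwhile_spec (L : List Int) (i zi : Nat) (hle : i + zi ≤ L.length)
    (hm : L.take zi = (L.drop i).take zi) :
    zwhile L.toArray i zi = lcp L (L.drop i) := by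
  rw [zwhile]
  split_ifs with h
  · obtain ⟨h1, h2⟩ := h
    have h1' : i + zi < L.length := by simpa using h1
    have hz : zi < L.length := by omega
    have he : L[zi] = L[i+zi] := by
      simpa [Array.getD, List.size_toArray, hz, h1'] using h2
    apply zwhile_spec L i (zi+1) (by omega)
    have hz2 : zi < (L.drop i).length := by simp; omega
    rw [List.take_succ_eq_append_getElem hz, List.take_succ_eq_append_getElem hz2, hm]
    congr 1
    simp [he]
  · rw [List.size_toArray] at h
    have hge : zi ≤ lcp L (L.drop i) := by
      rw [le_lcp_iff]
      exact ⟨by omega, by simp; omega, hm⟩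
    by_cases hend : i + zi = L.length
    · have := lcp_le_right L (L.drop i)
      simp at this; omega
    · have h1 : i + zi < L.length := by omega
      have hz : zi < L.length := by omega
      have hne : L[zi] ≠ L[i+zi] := by
        intro hc
        exact h ⟨h1, by simp [Array.getD, List.size_toArray, hz, h1, hc]⟩
      have hlt : lcp L (L.drop i) < zi + 1 := by
        by_contra hc
        push Not at hc
        rw [le_lcp_iff] at hc
        obtain ⟨_, hb, heq⟩ := hc
        have hzd : zi < (L.drop i).length := by simp; omega
        have := getElem_of_take_eq L (L.drop i) zi heq hz hzd
        simp at this
        exact hne this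
      omega
termination_by L.length - (i + zi)
decreasing_by omega

-- loop invariant for zarray's fold
def ZInv (L : List Int) (i : Nat) (st : Array Nat × Nat × Nat) : Prop :=
  st.1.size = L.length ∧
  (∀ j, 1 ≤ j → j < i → st.1.getD j 0 = lcp L (L.drop j)) ∧
  st.2.1 < i ∧ st.2.1 ≤ st.2.2 ∧ st.2.2 ≤ L.length ∧ (1 ≤ st.2.2 → 1 ≤ st.2.1) ∧
  L.take (st.2.2 - st.2.1) = (L.drop st.2.1).take (st.2.2 - st.2.1)

-- the seed min(r - i, z[i - l]) is a valid match length at i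
theorem seed_valid (L : List Int) (l r i v : Nat) (hl : l < i) (hir : i < r)
    (hb : L.take (r - l) = (L.drop l).take (r - l))
    (hv1 : v ≤ r - i) (hv2 : v ≤ lcp L (L.drop (i - l))) :
    L.take v = (L.drop i).take v := by
  have e0 : (L.take (r-l)).drop (i-l) = ((L.drop l).take (r-l)).drop (i-l) := by rw [hb]
  rw [List.drop_take, List.drop_take, List.drop_drop] at e0
  have hil : l + (i - l) = i := by omega
  have hrl : r - l - (i - l) = r - i := by omega
  rw [hil, hrl] at e0
  rw [le_lcp_iff] at hv2
  obtain ⟨_, _, hv2⟩ := hv2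
  calc L.take v = (L.drop (i-l)).take v := hv2
    _ = ((L.drop (i-l)).take (r-i)).take v := by rw [List.take_take]; congr 1; omega
    _ = ((L.drop i).take (r-i)).take v := by rw [e0]
    _ = (L.drop i).take v := by rw [List.take_take]; congr 1; omega

theorem zstep_inv (L : List Int) (i : Nat) (st : Array Nat × Nat × Nat)
    (h1 : 1 ≤ i) (h2 : i < L.length) (hinv : ZInv L i st) :
    ZInv L (i+1) (zstep L.toArray st i) := by
  obtain ⟨z, l, r⟩ := st
  obtain ⟨hsz, hj, hli, hlr, hrn, hrl, hb⟩ := hinv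
  simp only at hsz hj hli hlr hrn hrl hb
  set zi0 := if i < r then min (r - i) (z.getD (i - l) 0) else 0 with hzi0
  have hseed : L.take zi0 = (L.drop i).take zi0 ∧ i + zi0 ≤ L.length := by
    by_cases hir : i < r
    · have hz' : z.getD (i - l) 0 = lcp L (L.drop (i - l)) :=
        hj (i-l) (by have := hrl (by omega); omega) (by omega)
      simp only [hzi0, if_pos hir, hz']
      constructor
      · exact seed_valid L l r i _ hli hir hb (Nat.min_le_left _ _) (Nat.min_le_right _ _)
      · have : min (r - i) (lcp L (L.drop (i - l))) ≤ r - i := Nat.min_le_left _ _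
        omega
    · simp [hzi0, if_neg hir]
      omega
  have hzi : zwhile L.toArray i zi0 = lcp L (L.drop i) := zwhile_spec L i zi0 hseed.2 hseed.1
  have hlcp_le : lcp L (L.drop i) ≤ L.length - i := by
    have := lcp_le_right L (L.drop i); simpa using this
  have hlcp_take : L.take (lcp L (L.drop i)) = (L.drop i).take (lcp L (L.drop i)) := by
    have := (le_lcp_iff L (L.drop i) (lcp L (L.drop i))).mp (le_refl _)
    exact this.2.2
  unfold zstep
  simp only [← hzi0, hzi]
  have hisz : i < z.size := by omega
  have hgetj : ∀ j, j < i → (z.setIfInBounds i (lcp L (L.drop i))).getD j 0 = z.getD j 0 := by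
    intro j hji
    rw [Array.getD_eq_getD_getElem?, Array.getD_eq_getD_getElem?, Array.getElem?_setIfInBounds,
      if_neg (by omega : ¬ i = j)]
  have hgeti : (z.setIfInBounds i (lcp L (L.drop i))).getD i 0 = lcp L (L.drop i) := by
    rw [Array.getD_eq_getD_getElem?, Array.getElem?_setIfInBounds, if_pos rfl, if_pos hisz]
    rfl
  have hj' : ∀ j, 1 ≤ j → j < i + 1 → (z.setIfInBounds i (lcp L (L.drop i))).getD j 0 = lcp L (L.drop j) := by
    intro j hj1 hji1
    by_cases hje : j = i
    · subst hje; exact hgeti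
    · rw [hgetj j (by omega)]; exact hj j hj1 (by omega)
  split_ifs with hcase
  · refine ⟨by simpa using hsz, hj', ?_, ?_, ?_, ?_, ?_⟩
    · show i < i + 1; omega
    · show i ≤ i + lcp L (L.drop i); omega
    · show i + lcp L (L.drop i) ≤ L.length; omega
    · show 1 ≤ i + lcp L (L.drop i) → 1 ≤ i; intro; omega
    · show L.take (i + lcp L (L.drop i) - i) = (L.drop i).take (i + lcp L (L.drop i) - i)
      rw [Nat.add_sub_cancel_left]
      exact hlcp_take
  · exact ⟨by simpa using hsz, hj', by show l < i + 1; omega, hlr, hrn, hrl, hb⟩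

theorem zfold_inv (L : List Int) (cnt : Nat) : ∀ (i : Nat) (st : Array Nat × Nat × Nat),
    1 ≤ i → i + cnt ≤ L.length → ZInv L i st →
    ZInv L (i + cnt) ((List.range' i cnt).foldl (zstep L.toArray) st) := by
  induction cnt with
  | zero => intro i st _ _ h; simpa using h
  | succ c ih =>
    intro i st hi hcnt hinv
    rw [List.range'_succ, List.foldl_cons]
    have := ih (i+1) (zstep L.toArray st i) (by omega) (by omega)
      (zstep_inv L i st hi (by omega) hinv)
    have he : i + (c + 1) = (i + 1) + c := by omega
    rw [he]
    exact this

theorem zarray_getD (L : List Int) (i : Nat) (h1 : 1 ≤ i) (h2 : i < L.length) :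
    (zarray L.toArray).getD i 0 = lcp L (L.drop i) := by
  unfold zarray
  rw [List.size_toArray]
  have hinit : ZInv L 1 (Array.replicate L.length 0, 0, 0) := by
    refine ⟨by simp, ?_, ?_, ?_, ?_, ?_, by simp⟩
    · intro j hj1 hj2; omega
    · show 0 < 1; omega
    · show (0:Nat) ≤ 0; omega
    · show 0 ≤ L.length; omega
    · show 1 ≤ 0 → 1 ≤ 0; intro; omega
  have := zfold_inv L (L.length - 1) 1 _ (by omega) (by omega) hinit
  have he : 1 + (L.length - 1) = L.length := by omega
  rw [he] at this
  exact this.2.1 i h1 h2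

-- A-side characterization of subseq existence
theorem subseq_isSome_iff (s t : List Int) (h : s.length ≤ t.length) :
    (subseq s t).isSome ↔ ∃ j : Nat, j < t.length - s.length + 1 ∧ s = (t.drop j).take s.length := by
  unfold subseq
  rw [List.find?_isSome]
  constructor
  · rintro ⟨x, hmem, hp⟩
    rw [PySem.List.mem_pyRange_one] at hmem
    obtain ⟨hx0, hx1⟩ := hmem
    refine ⟨x.toNat, by omega, ?_⟩
    have hx : ((x.toNat : Nat) : Int) = x := by omega
    rw [← hx, PySem.List.slice_natCast_add] at hp
    exact eq_of_beq hp
  · rintro ⟨j, hj, hs⟩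
    refine ⟨(j : Int), ?_, ?_⟩
    · rw [PySem.List.mem_pyRange_one]
      exact ⟨by positivity, by omega⟩
    · rw [PySem.List.slice_natCast_add]
      exact beq_iff_eq.mpr hs

-- substring condition read off the Z-array of s ++ t
theorem lcp_sub_iff (s t : List Int) (i : Nat) (hi : i ≤ t.length - s.length)
    (h : s.length ≤ t.length) :
    (s.length ≤ lcp (s ++ t) ((s ++ t).drop (s.length + i)) ↔ s = (t.drop i).take s.length) := by
  rw [le_lcp_iff, List.drop_length_add_append, List.take_left]
  constructor
  · rintro ⟨_, _, he⟩; exact he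
  · intro he
    exact ⟨by simp, by simp; omega, he⟩

-- overlap condition read off the Z-array of u ++ v (prefix of u vs suffix of v)
theorem lcp_ov_iff (u v : List Int) (k : Nat) (hku : k ≤ u.length) (hkv : k ≤ v.length) :
    (k ≤ lcp (u ++ v) ((u ++ v).drop (u.length + (v.length - k))) ↔
      v.drop (v.length - k) = u.take k) := by
  have hlen : (v.drop (v.length - k)).length = k := by simp; omega
  have hdt : (v.drop (v.length - k)).take k = v.drop (v.length - k) :=
    List.take_of_length_le (le_of_eq hlen)
  rw [le_lcp_iff, List.drop_length_add_append, List.take_append_of_le_length hku, hdt]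
  constructor
  · rintro ⟨_, _, he⟩
    exact he.symm
  · intro he
    exact ⟨by simp; omega, by omega, he.symm⟩

-- head (substring) conditions of the two cores agree
theorem head_cond_iff (s t : List Int) (h : s.length ≤ t.length) :
    ((subseq s t).isSome = true) ↔
    (s.length = 0 ∨ ((List.range (t.length - s.length + 1)).any
      (fun i => s.length ≤ (zarray ((s ++ t).toArray)).getD (s.length + i) 0)) = true) := by
  by_cases hn : s.length = 0
  · constructor
    · intro _; exact Or.inl hn
    · intro _
      rw [subseq_isSome_iff s t h]
      refine ⟨0, by omega, ?_⟩
      have : s = [] := List.length_eq_zero_iff.mp hn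
      simp [this]
  · have hn1 : 1 ≤ s.length := by omega
    rw [subseq_isSome_iff s t h, List.any_eq_true]
    constructor
    · rintro ⟨j, hj, hs⟩
      refine Or.inr ⟨j, List.mem_range.mpr (by omega), ?_⟩
      rw [decide_eq_true_iff]
      rw [zarray_getD (s++t) (s.length + j) (by omega) (by simp; omega)]
      exact (lcp_sub_iff s t j (by omega) h).mpr hs
    · rintro (hc | ⟨i, hi, hd⟩)
      · exact absurd hc hn
      · rw [List.mem_range] at hi
        rw [decide_eq_true_iff] at hd
        rw [zarray_getD (s++t) (s.length + i) (by omega) (by simp; omega)] at hd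
        exact ⟨i, by omega, (lcp_sub_iff s t i (by omega) h).mp hd⟩

-- the per-size overlap conditions agree (t-suffix vs s-prefix)
theorem cond1_iff (s t : List Int) (k : Nat) (h : s.length ≤ t.length)
    (hk1 : 1 ≤ k) (hk : k ≤ s.length - 1) :
    ((PySem.List.slice t (some (-(k:Int))) none == PySem.List.slice s none (some (k:Int))) = true) ↔
    (k ≤ (zarray ((s ++ t).toArray)).getD (s.length + t.length - k) 0) := by
  rw [beq_iff_eq]
  simp only [PySem.List.slice_from_neg_natCast t k (by omega : 0 < k), PySem.List.slice_to_natCast]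
  rw [show s.length + t.length - k = s.length + (t.length - k) from by omega]
  rw [zarray_getD (s++t) (s.length + (t.length - k)) (by omega) (by simp; omega)]
  exact (lcp_ov_iff s t k (by omega) (by omega)).symm

theorem cond2_iff (s t : List Int) (k : Nat) (h : s.length ≤ t.length)
    (hk1 : 1 ≤ k) (hk : k ≤ s.length - 1) :
    ((PySem.List.slice s (some (-(k:Int))) none == PySem.List.slice t none (some (k:Int))) = true) ↔
    (k ≤ (zarray ((t ++ s).toArray)).getD (t.length + s.length - k) 0) := by
  rw [beq_iff_eq]
  simp only [PySem.List.slice_from_neg_natCast s k (by omega : 0 < k), PySem.List.slice_to_natCast]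
  rw [show t.length + s.length - k = t.length + (s.length - k) from by omega]
  rw [zarray_getD (t++s) (t.length + (s.length - k)) (by omega) (by simp; omega)]
  exact (lcp_ov_iff t s k (by omega) (by omega)).symm

theorem core_eq (s t : List Int) (h : s.length ≤ t.length) :
    overlapsCore s t = altCore s t := by
  simp only [overlapsCore, altCore]
  rw [PySem.List.pyRange_one]
  rw [show ((s.length : Int) - 1).toNat = s.length - 1 from by omega]
  rw [List.range'_eq_map_range]
  rw [List.foldl_map, List.foldl_map]
  simp only [head_cond_iff s t h]
  apply PySem.List.foldl_congr_mem
  intro acc k hk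
  rw [List.mem_range] at hk
  rw [show (1 + (k:Int)) = ((k+1 : Nat) : Int) from by push_cast; ring]
  rw [show 1 + k = k + 1 from by omega]
  rw [PySem.List.slice_from_natCast, PySem.List.slice_from_natCast]
  simp only [cond1_iff s t (k+1) h (by omega) (by omega),
    cond2_iff s t (k+1) h (by omega) (by omega)]

-- ===== VERDICT (by name: the statement is the Claim_ definition above) =====
theorem overlaps_spec : Claim_equal_overlaps := by
  unfold Claim_equal_overlaps Spec_overlaps
  intro s t _
  unfold overlaps overlaps_alt
  split_ifs with hlen
  · exact core_eq t s (by omega)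
  · exact core_eq s t (by omega)
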